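-- pv_equiv track=rewrite | github.com/ms-jpq/coq_nvim | rplugin/python3/nap/clients/paths.py | parse_dots
-- ===== SOURCE A (Python) =====
-- from typing import AsyncIterator, Iterator, Sequence
--
-- def parse_dots(path: str) -> str:
--     def cont() -> Iterator[str]:
--         for c in reversed(path):
--             if c == ".":
--                 yield c
--             else:
--                 break
--
--     return "".join(cont())
-- ===== SOURCE B (Python) =====
-- def parse_dots(path: str) -> str:
--     stripped = path.rstrip(".")
--     return path[len(stripped):]
-- ===== Notes on version B (the rewrite author's own statement) =====
-- stated objective: idiomatic
-- what changed: Replaces the manual reversed char-by-char generator-and-join with a single rstrip of trailing dots plus a slice of the removed suffix.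
import Mathlib
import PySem

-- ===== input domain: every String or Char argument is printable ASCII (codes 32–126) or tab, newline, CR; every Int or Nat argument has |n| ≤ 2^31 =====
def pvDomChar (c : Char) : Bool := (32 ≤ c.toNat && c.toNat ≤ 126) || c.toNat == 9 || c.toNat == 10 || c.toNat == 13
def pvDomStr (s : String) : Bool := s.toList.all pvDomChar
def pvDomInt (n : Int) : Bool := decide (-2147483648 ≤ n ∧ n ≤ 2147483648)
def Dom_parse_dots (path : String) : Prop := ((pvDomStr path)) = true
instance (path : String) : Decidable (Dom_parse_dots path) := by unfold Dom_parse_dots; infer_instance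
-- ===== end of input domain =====

-- B replaces A's reversed char-by-char generator with rstrip('.') + a suffix slice (idiomatic).

-- ===== PORT A =====
-- A scans reversed(path), yielding '.' until the first non-dot, then joins the yields.
def parse_dots (path : String) : String :=
  String.ofList (path.toList.reverse.takeWhile (fun c => c == '.'))

-- ===== PORT B =====
-- path.rstrip(".") ported by hand (PySem has only two-sided stripChars): drop the
-- trailing run of '.' from the right; exact for any string.  path[len(stripped):] → Str.slice.
def parse_dots_alt (path : String) : String :=
  let stripped : List Char := (path.toList.reverse.dropWhile (fun c => c == '.')).reverse
  PySem.Str.slice path (some (stripped.length : Int)) none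

-- ===== PRECONDITION & SPEC =====
def Spec_parse_dots (path : String) (out : String) : Prop := out = parse_dots_alt path
instance (path : String) (out : String) : Decidable (Spec_parse_dots path out) := by unfold Spec_parse_dots; infer_instance

-- ===== CLAIM (what is proved, stated in full; the proofs are below) =====
def Claim_equal_parse_dots : Prop := ∀ (path : String), Dom_parse_dots path → Spec_parse_dots path (parse_dots path)

-- ===== LEMMAS AND PROOFS =====

-- the takeWhile run of dots is a run of one repeated character, hence reverse-invariant
theorem takeWhile_dots_reverse (l : List Char) :
    (l.takeWhile (fun c => c == '.')).reverse = l.takeWhile (fun c => c == '.') := by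
  have h : ∀ c ∈ l.takeWhile (fun c => c == '.'), c = '.' := by
    intro c hc
    have := List.mem_takeWhile_imp hc
    simpa using this
  have : l.takeWhile (fun c => c == '.') =
      List.replicate (l.takeWhile (fun c => c == '.')).length '.' :=
    List.eq_replicate_of_mem h
  rw [this, List.reverse_replicate]

theorem drop_dropWhile_rev (l : List Char) :
    l.drop (l.reverse.dropWhile (fun c => c == '.')).length
      = (l.reverse.takeWhile (fun c => c == '.')).reverse := by
  have hsplit : l = (l.reverse.dropWhile (fun c => c == '.')).reverse
      ++ (l.reverse.takeWhile (fun c => c == '.')).reverse := by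
    conv_lhs => rw [← List.reverse_reverse l,
      ← List.takeWhile_append_dropWhile (p := fun c => c == '.') (l := l.reverse)]
    rw [List.reverse_append]
  conv_lhs => rw [hsplit]
  rw [List.drop_left' (by simp)]

-- ===== VERDICT (by name: the statement is the Claim_ definition above) =====
theorem parse_dots_spec : Claim_equal_parse_dots := by
  intro path _
  unfold Spec_parse_dots parse_dots parse_dots_alt
  apply String.ext
  simp only [PySem.Str.toList_slice, PySem.Chars.slice_eq_listSlice,
    List.length_reverse, PySem.List.slice_from_natCast, String.toList_ofList]
  rw [drop_dropWhile_rev, takeWhile_dots_reverse]
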